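-- pv_equiv track=rewrite | github.com/yalexer1/username-clouds-bot | bot.py | is_easily_readable
-- ===== SOURCE A (Python) =====
-- CONSONANTS = set('bcdfghjklmnpqrstvwxyz')
--
-- def is_easily_readable(username: str) -> bool:
--     username = username.lower()
--     consonant_run = 0
--     for ch in username:
--         if ch in CONSONANTS:
--             consonant_run += 1
--             if consonant_run > 2:
--                 return False
--         else:
--             consonant_run = 0
--     return True
-- ===== SOURCE B (Python) =====
-- CONSONANTS = set('bcdfghjklmnpqrstvwxyz')
--
-- def is_easily_readable(username: str) -> bool:
--     cons = [ch in CONSONANTS for ch in username.lower()]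
--     return not any(a and b and c for a, b, c in zip(cons, cons[1:], cons[2:]))
-- ===== Notes on version B (the rewrite author's own statement) =====
-- stated objective: idiomatic
-- what changed: Replaces the stateful run-counter loop with early return by a stateless sliding-window check: map each character to consonant/not, then test every window of three consecutive positions via zip/any.
import Mathlib
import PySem

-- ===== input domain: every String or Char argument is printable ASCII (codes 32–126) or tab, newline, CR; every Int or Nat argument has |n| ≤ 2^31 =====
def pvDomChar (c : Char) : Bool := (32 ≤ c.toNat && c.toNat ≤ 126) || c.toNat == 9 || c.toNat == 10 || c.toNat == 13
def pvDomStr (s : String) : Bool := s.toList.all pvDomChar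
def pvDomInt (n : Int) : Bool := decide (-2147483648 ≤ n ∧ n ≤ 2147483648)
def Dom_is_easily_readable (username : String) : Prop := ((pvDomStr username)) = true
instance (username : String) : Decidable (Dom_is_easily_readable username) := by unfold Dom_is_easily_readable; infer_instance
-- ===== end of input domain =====

-- B lowercases once, maps each char to a consonant flag and tests each window of
-- three consecutive positions (zip/any) instead of A's stateful run counter with early exit.

-- ===== PORT A =====
def pvCONSONANTS : PySem.Set Char := PySem.Set.ofList "bcdfghjklmnpqrstvwxyz".toList

-- the for-loop with its running counter and early `return False`
def pvLoopA : List Char → Int → Bool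
  | [], _ => true
  | ch :: rest, run =>
    if pvCONSONANTS.contains ch then
      if run + 1 > 2 then false else pvLoopA rest (run + 1)
    else pvLoopA rest 0

def is_easily_readable (username : String) : Bool :=
  pvLoopA (PySem.Str.lower username).toList 0

-- ===== PORT B =====
def pvIsConsB (c : Char) : Bool := ("bcdfghjklmnpqrstvwxyz".toList).contains c

def pvZipAny (bs : List Bool) : Bool :=
  (bs.zip (bs.tail.zip bs.tail.tail)).any (fun t => t.1 && t.2.1 && t.2.2)

def is_easily_readable_alt (username : String) : Bool :=
  let cons := (PySem.Str.lower username).toList.map pvIsConsB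
  !(pvZipAny cons)

-- ===== PRECONDITION & SPEC =====
def Spec_is_easily_readable (username : String) (out : Bool) : Prop := out = is_easily_readable_alt username
instance (username : String) (out : Bool) : Decidable (Spec_is_easily_readable username out) := by unfold Spec_is_easily_readable; infer_instance

-- ===== CLAIM (what is proved, stated in full; the proofs are below) =====
def Claim_equal_is_easily_readable : Prop := ∀ (username : String), Dom_is_easily_readable username → Spec_is_easily_readable username (is_easily_readable username)

-- ===== LEMMAS AND PROOFS =====

-- "has three consecutive trues", by structural recursion
def pvTri : List Bool → Bool
  | a :: b :: c :: r => (a && b && c) || pvTri (b :: c :: r)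
  | _ => false

theorem pvZipAny_eq_tri (bs : List Bool) : pvZipAny bs = pvTri bs := by
  match bs with
  | [] => rfl
  | [_] => rfl
  | [_, _] => rfl
  | a :: b :: c :: r =>
    have ih := pvZipAny_eq_tri (b :: c :: r)
    simp [pvZipAny, pvTri] at ih ⊢
    rw [← ih]

theorem pvTri_false_cons (l : List Bool) : pvTri (false :: l) = pvTri l := by
  match l with
  | [] => rfl
  | [_] => rfl
  | _ :: _ :: _ => simp [pvTri]

theorem pvMemCons (c : Char) : pvCONSONANTS.contains c = pvIsConsB c := by
  simp [pvCONSONANTS, pvIsConsB, PySem.Set.ofList]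

theorem pvLoopA_eq_tri (cs : List Char) (k : Nat) (hk : k ≤ 2) :
    pvLoopA cs (k : Int) = !pvTri (List.replicate k true ++ cs.map pvIsConsB) := by
  induction cs generalizing k with
  | nil =>
    interval_cases k <;> simp [pvLoopA, pvTri, List.replicate]
  | cons c rest ih =>
    simp only [List.map_cons]
    rw [pvLoopA, pvMemCons]
    by_cases hc : pvIsConsB c = true
    · simp only [hc, if_true]
      by_cases h2 : k = 2
      · subst h2
        norm_num
        simp [List.replicate, pvTri]
      · have hk1 : k + 1 ≤ 2 := by omega
        have hlt : ¬ ((k : Int) + 1 > 2) := by omega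
        simp only [hlt, if_false]
        have := ih (k + 1) hk1
        push_cast at this
        rw [this]
        congr 1
        simp [List.replicate_succ']
    · simp only [eq_false_of_ne_true hc]
      simp only [Bool.false_eq_true, if_false]
      have := ih 0 (by omega)
      simp at this
      rw [this]
      congr 1
      interval_cases k <;>
        simp [List.replicate, pvTri_false_cons] <;>
        cases h : rest.map pvIsConsB <;> simp [pvTri, pvTri_false_cons]

-- ===== VERDICT (by name: the statement is the Claim_ definition above) =====
theorem is_easily_readable_spec : Claim_equal_is_easily_readable := by
  intro username _
  unfold Spec_is_easily_readable is_easily_readable is_easily_readable_alt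
  simp only [pvZipAny_eq_tri]
  have := pvLoopA_eq_tri (PySem.Str.lower username).toList 0 (by omega)
  simpa using this
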